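-- pv_equiv track=rewrite | github.com/teenitiny/py-exercise | 01_elementary/number_base.py | checkio_v2
-- ===== SOURCE A (Python) =====
-- def checkio_v2(str_number, radix):
--     wynik=0;
--     k=len(str_number)-1
--     abc="0123456789ABCDEFGHIJKLMNOPQRSTUVWXYZ"
--     error=False
--     for i in str_number:
--         if abc.find(i)!=-1 and abc.find(i)<radix:
--             liczba=abc.find(i)
--             wynik+=liczba*pow(radix,k)
--             k-=1
--         else: error=True
--     if error : wynik=-1
--     return wynik
-- ===== SOURCE B (Python) =====
-- def checkio_v2(str_number, radix):
--     abc = "0123456789ABCDEFGHIJKLMNOPQRSTUVWXYZ"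
--     wynik = 0
--     for ch in str_number:
--         d = abc.find(ch)
--         if d == -1 or d >= radix:
--             return -1
--         wynik = wynik * radix + d
--     return wynik
-- ===== Notes on version B (the rewrite author's own statement) =====
-- stated objective: faster
-- what changed: Horner's method (wynik = wynik*radix + digit) in one pass with early exit on an invalid digit, replacing per-character pow(radix, k) and the error flag
import Mathlib
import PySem

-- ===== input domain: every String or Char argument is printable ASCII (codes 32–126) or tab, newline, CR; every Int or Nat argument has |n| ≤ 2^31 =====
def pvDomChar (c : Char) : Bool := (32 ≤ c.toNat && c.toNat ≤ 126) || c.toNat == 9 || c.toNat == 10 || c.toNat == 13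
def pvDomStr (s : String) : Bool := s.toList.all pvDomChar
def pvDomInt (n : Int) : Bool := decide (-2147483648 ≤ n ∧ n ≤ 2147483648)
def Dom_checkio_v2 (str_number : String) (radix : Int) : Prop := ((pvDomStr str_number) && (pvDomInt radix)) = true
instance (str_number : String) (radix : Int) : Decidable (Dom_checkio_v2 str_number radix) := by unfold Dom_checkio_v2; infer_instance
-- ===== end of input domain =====

-- B replaces per-character pow(radix, k) with Horner's method (one multiply-add per
-- character, early exit on an invalid digit): asymptotically fewer bit operations.


-- ===== PORT A =====
-- abc.find(i) for the one-character string i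
def pvAbc : List Char := "0123456789ABCDEFGHIJKLMNOPQRSTUVWXYZ".toList
def pvDigit (c : Char) : Int := PySem.Chars.find pvAbc [c]

-- the for-loop of A over state (wynik, k, error); pow(radix, k) is only evaluated on the
-- valid-digit branch, where k ≥ 0 always holds, so radix ^ k.toNat is exact there.
def pvALoop (radix : Int) : List Char → Int × Int × Bool → Int × Int × Bool
  | [], st => st
  | c :: t, (w, k, e) =>
    if pvDigit c ≠ -1 ∧ pvDigit c < radix then
      pvALoop radix t (w + pvDigit c * radix ^ k.toNat, k - 1, e)
    else
      pvALoop radix t (w, k, true)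

def checkio_v2 (str_number : String) (radix : Int) : Int :=
  let st := pvALoop radix str_number.toList (0, PySem.Str.len str_number - 1, false)
  if st.2.2 then -1 else st.1

-- ===== PORT B =====
-- Horner's loop with early return (none = the Python 'return -1')
def pvBLoop (radix : Int) : List Char → Int → Option Int
  | [], acc => some acc
  | c :: t, acc =>
    let d := pvDigit c
    if d = -1 ∨ radix ≤ d then none else pvBLoop radix t (acc * radix + d)

def checkio_v2_alt (str_number : String) (radix : Int) : Int :=
  match pvBLoop radix str_number.toList 0 with
  | some v => v
  | none => -1

-- ===== PRECONDITION & SPEC =====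
def Spec_checkio_v2 (str_number : String) (radix : Int) (out : Int) : Prop := out = checkio_v2_alt str_number radix
instance (str_number : String) (radix : Int) (out : Int) : Decidable (Spec_checkio_v2 str_number radix out) := by unfold Spec_checkio_v2; infer_instance

-- ===== CLAIM (what is proved, stated in full; the proofs are below) =====
def Claim_equal_checkio_v2 : Prop := ∀ (str_number : String) (radix : Int), Dom_checkio_v2 str_number radix → Spec_checkio_v2 str_number radix (checkio_v2 str_number radix)

-- ===== LEMMAS AND PROOFS =====

def pvValid (r : Int) (c : Char) : Prop := pvDigit c ≠ -1 ∧ pvDigit c < r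

-- Horner value of a list of (valid) digits, seeded with acc
def pvHv (r : Int) : List Char → Int → Int
  | [], a => a
  | c :: t, a => pvHv r t (a * r + pvDigit c)

theorem pvHv_shift (r : Int) (cs : List Char) (a : Int) :
    pvHv r cs a = a * r ^ cs.length + pvHv r cs 0 := by
  induction cs generalizing a with
  | nil => simp [pvHv]
  | cons c t ih =>
    simp only [pvHv, List.length_cons]
    rw [ih (a * r + pvDigit c), ih (0 * r + pvDigit c)]
    ring

theorem pvBLoop_some (r : Int) (cs : List Char) (a : Int)
    (h : ∀ c ∈ cs, pvValid r c) : pvBLoop r cs a = some (pvHv r cs a) := by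
  induction cs generalizing a with
  | nil => rfl
  | cons c t ih =>
    have hc := h c (by simp)
    have : ¬ (pvDigit c = -1 ∨ r ≤ pvDigit c) := by
      rcases hc with ⟨h1, h2⟩; push Not; exact ⟨h1, h2⟩
    simp only [pvBLoop, if_neg this, pvHv]
    exact ih _ (fun x hx => h x (by simp [hx]))

theorem pvBLoop_none (r : Int) (cs : List Char) (a : Int)
    (h : ∃ c ∈ cs, ¬ pvValid r c) : pvBLoop r cs a = none := by
  induction cs generalizing a with
  | nil => simp at h
  | cons c t ih =>
    by_cases hc : pvDigit c = -1 ∨ r ≤ pvDigit c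
    · simp [pvBLoop, if_pos hc]
    · have hcv : pvValid r c := by
        push Not at hc; exact ⟨hc.1, hc.2⟩
      rcases h with ⟨x, hx, hxv⟩
      rcases List.mem_cons.mp hx with rfl | hxt
      · exact absurd hcv hxv
      · simp only [pvBLoop, if_neg hc]
        exact ih _ ⟨x, hxt, hxv⟩

theorem pvALoop_err_true (r : Int) (cs : List Char) (w k : Int) :
    (pvALoop r cs (w, k, true)).2.2 = true := by
  induction cs generalizing w k with
  | nil => simp [pvALoop]
  | cons c t ih =>
    simp only [pvALoop]
    by_cases hc : ¬pvDigit c = -1 ∧ pvDigit c < r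
    · rw [if_pos hc]; exact ih _ _
    · rw [if_neg hc]; exact ih _ _

theorem pvALoop_err_of (r : Int) (cs : List Char) (w k : Int) (e : Bool)
    (h : ∃ c ∈ cs, ¬ pvValid r c) : (pvALoop r cs (w, k, e)).2.2 = true := by
  induction cs generalizing w k e with
  | nil => simp at h
  | cons c t ih =>
    simp only [pvALoop]
    by_cases hc : ¬pvDigit c = -1 ∧ pvDigit c < r
    · have hv : pvValid r c := hc
      rcases h with ⟨x, hx, hxv⟩
      rcases List.mem_cons.mp hx with rfl | hxt
      · exact absurd hv hxv
      · rw [if_pos hc]; exact ih _ _ _ ⟨x, hxt, hxv⟩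
    · rw [if_neg hc]; exact pvALoop_err_true r t _ _

theorem pvALoop_valid (r : Int) (cs : List Char) (w : Int)
    (h : ∀ c ∈ cs, pvValid r c) :
    pvALoop r cs (w, (cs.length : Int) - 1, false) = (w + pvHv r cs 0, -1, false) := by
  induction cs generalizing w with
  | nil => simp [pvALoop, pvHv]
  | cons c t ih =>
    have hc := h c (by simp)
    have hk : (((c :: t).length : Int) - 1).toNat = t.length := by
      simp only [List.length_cons]; omega
    have hstep : ((c :: t).length : Int) - 1 - 1 = (t.length : Int) - 1 := by
      simp only [List.length_cons]; push_cast; ring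
    have hif : ¬pvDigit c = -1 ∧ pvDigit c < r := hc
    simp only [pvALoop]
    rw [if_pos hif, hk, hstep, ih _ (fun x hx => h x (by simp [hx]))]
    have : pvHv r (c :: t) 0 = pvDigit c * r ^ t.length + pvHv r t 0 := by
      simp only [pvHv]
      rw [pvHv_shift r t (0 * r + pvDigit c)]
      ring_nf
    rw [this]
    congr 1
    ring

-- ===== VERDICT (by name: the statement is the Claim_ definition above) =====
theorem checkio_v2_spec : Claim_equal_checkio_v2 := by
  intro s r _
  unfold Spec_checkio_v2 checkio_v2 checkio_v2_alt
  have hlen : PySem.Str.len s = (s.toList.length : Int) := by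
    simp [PySem.Str.len_eq]
  by_cases h : ∀ c ∈ s.toList, pvValid r c
  · rw [hlen, pvALoop_valid r s.toList 0 h, pvBLoop_some r s.toList 0 h]
    simp
  · push Not at h
    have hex : ∃ c ∈ s.toList, ¬ pvValid r c := h
    have herr : (pvALoop r s.toList (0, PySem.Str.len s - 1, false)).2.2 = true :=
      pvALoop_err_of r s.toList _ _ _ hex
    rw [pvBLoop_none r s.toList 0 hex]
    simp only [herr, if_true]
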